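-- pv_equiv track=rewrite | github.com/beerbank3/coding_test-Python- | coding_test_practice4.py | solution
-- ===== SOURCE A (Python) =====
-- from itertools import cycle
--
-- def solution(answers):
--     win = []
--     answer_temp = []
--     count = [0,0,0]
--     a = [1,2,3,4,5]
--     b = [2,1,2,3,2,4,2,5]
--     c = [3,3,1,1,2,2,4,4,5,5]
--     for ans1, ans2, ans3,answer in zip(cycle(a), cycle(b), cycle(c), answers):
--         if ans1 == answer:
--             count[0]+=1
--         if ans2 == answer:
--             count[1]+=1
--         if ans3 == answer:
--             count[2]+=1
--
--     for person, score in enumerate(count):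
--         if score == max(count):
--             win.append(person+1)
--     return win
-- ===== SOURCE B (Python) =====
-- def solution(answers):
--     pats = [[1, 2, 3, 4, 5],
--             [2, 1, 2, 3, 2, 4, 2, 5],
--             [3, 3, 1, 1, 2, 2, 4, 4, 5, 5]]
--     # histogram of (position mod 40, answer) pairs; 40 = lcm of the pattern
--     # periods, so i % 40 determines every pattern's symbol at position i
--     freq = {}
--     for i, ans in enumerate(answers):
--         k = (i % 40, ans)
--         freq[k] = freq.get(k, 0) + 1
--     scores = []
--     for p in pats:
--         s = 0
--         for (pos, v), c in freq.items():
--             if p[pos % len(p)] == v: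
--                 s += c
--         scores.append(s)
--     best = max(scores)
--     return [person + 1 for person, s in enumerate(scores) if s == best]
-- ===== Notes on version B (the rewrite author's own statement) =====
-- stated objective: alternative
-- what changed: Replaces A's fused cycle/zip scan with three running counters by a histogram algorithm: one pass buckets answers by (position mod 40, value) in a dict (40 = lcm of the pattern periods), then each pattern is scored by scanning the histogram instead of the answers.
import Mathlib
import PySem

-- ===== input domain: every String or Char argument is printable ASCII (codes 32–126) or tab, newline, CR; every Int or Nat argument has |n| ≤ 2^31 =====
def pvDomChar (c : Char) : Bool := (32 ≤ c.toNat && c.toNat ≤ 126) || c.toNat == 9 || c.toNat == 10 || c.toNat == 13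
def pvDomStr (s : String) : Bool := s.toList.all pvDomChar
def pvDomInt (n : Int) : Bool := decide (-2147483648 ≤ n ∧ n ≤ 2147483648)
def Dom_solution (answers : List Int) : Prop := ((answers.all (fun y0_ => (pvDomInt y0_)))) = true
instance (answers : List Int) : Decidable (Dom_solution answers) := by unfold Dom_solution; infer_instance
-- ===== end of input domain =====

-- B replaces A's fused three-counter cycle/zip scan by a histogram algorithm: it buckets
-- the answers by (position mod 40, value) — 40 = lcm of the pattern periods — and scores
-- each pattern from the histogram; an alternative decomposition, no speed claim.

-- ===== PORT A =====
-- the three fixed answer patterns a, b, c of A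
def pvPatA : List Int := [1, 2, 3, 4, 5]
def pvPatB : List Int := [2, 1, 2, 3, 2, 4, 2, 5]
def pvPatC : List Int := [3, 3, 1, 1, 2, 2, 4, 4, 5, 5]

-- the fused loop: zip(cycle(a), cycle(b), cycle(c), answers); cycle is realised by the
-- running position i, pattern.getD (i % length) 0 (exact: the index is always in range)
def solutionLoop : List Int → Nat → Int × Int × Int → Int × Int × Int
  | [], _, count => count
  | answer :: rest, i, (c1, c2, c3) =>
      let ans1 := pvPatA.getD (i % pvPatA.length) 0
      let ans2 := pvPatB.getD (i % pvPatB.length) 0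
      let ans3 := pvPatC.getD (i % pvPatC.length) 0
      solutionLoop rest (i + 1)
        ((if ans1 = answer then c1 + 1 else c1),
         (if ans2 = answer then c2 + 1 else c2),
         (if ans3 = answer then c3 + 1 else c3))

def solution (answers : List Int) : List Int :=
  let t := solutionLoop answers 0 (0, 0, 0)
  let count : List Int := [t.1, t.2.1, t.2.2]
  (PySem.List.enumerate count).foldl
    (fun win p =>
      if p.2 = (PySem.List.max? count (fun x => x)).getD 0 then win ++ [p.1 + 1] else win)
    []

-- ===== PORT B =====
def pvPatterns : List (List Int) := [[1, 2, 3, 4, 5],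
                                     [2, 1, 2, 3, 2, 4, 2, 5],
                                     [3, 3, 1, 1, 2, 2, 4, 4, 5, 5]]

-- freq[k] = freq.get(k, 0) + 1 over k = (i % 40, ans)
def pvFreq (answers : List Int) : PySem.Dict (Int × Int) Int :=
  (PySem.List.enumerate answers).foldl
    (fun d pr =>
      let k : Int × Int := (PySem.Int.mod pr.1 40, pr.2)
      d.insert k (d.getD k 0 + 1))
    PySem.Dict.empty

-- for (pos, v), c in freq.items(): if p[pos % len(p)] == v: s += c
-- (pyGetD is exact: 0 ≤ pos % len(p) < len(p))
def pvScoreOf (freq : PySem.Dict (Int × Int) Int) (p : List Int) : Int :=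
  freq.items.foldl
    (fun s it =>
      if PySem.List.pyGetD p (PySem.Int.mod it.1.1 (p.length : Int)) 0 = it.1.2
      then s + it.2 else s)
    0

def solution_alt (answers : List Int) : List Int :=
  let freq := pvFreq answers
  let scores := pvPatterns.map (fun p => pvScoreOf freq p)
  let best := (PySem.List.max? scores (fun x => x)).getD 0
  (PySem.List.enumerate scores).filterMap
    (fun pr => if pr.2 = best then some (pr.1 + 1) else none)

-- ===== PRECONDITION & SPEC =====
def Spec_solution (answers : List Int) (out : List Int) : Prop := out = solution_alt answers
instance (answers : List Int) (out : List Int) : Decidable (Spec_solution answers out) := by unfold Spec_solution; infer_instance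

-- ===== CLAIM (what is proved, stated in full; the proofs are below) =====
def Claim_equal_solution : Prop := ∀ (answers : List Int), Dom_solution answers → Spec_solution answers (solution answers)

-- ===== LEMMAS AND PROOFS =====

-- common reference count: matches of pattern p against l, positions starting at i
def pvCnt (p : List Int) : List Int → Nat → Int
  | [], _ => 0
  | x :: rest, i => (if p.getD (i % p.length) 0 = x then 1 else 0) + pvCnt p rest (i + 1)

lemma solutionLoop_eq (l : List Int) (i : Nat) (c1 c2 c3 : Int) :
    solutionLoop l i (c1, c2, c3) =
      (c1 + pvCnt pvPatA l i, c2 + pvCnt pvPatB l i, c3 + pvCnt pvPatC l i) := by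
  induction l generalizing i c1 c2 c3 with
  | nil => simp [solutionLoop, pvCnt]
  | cons x rest ih =>
      simp only [solutionLoop, pvCnt, ih]
      split_ifs <;> simp only [Prod.mk.injEq] <;> refine ⟨by ring, by ring, by ring⟩

-- the histogram keys of answers, positions starting at i
def pvKeys (l : List Int) (i : Nat) : List (Int × Int) :=
  (PySem.List.enumerate l (i : Int)).map (fun pr => (PySem.Int.mod pr.1 40, pr.2))

-- B's match test on a pattern p, as a Bool predicate on a key
def pvHit (p : List Int) (k : Int × Int) : Bool :=
  decide (PySem.List.pyGetD p (PySem.Int.mod k.1 (p.length : Int)) 0 = k.2)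

lemma pvFreq_eq_counter (answers : List Int) :
    pvFreq answers = PySem.Dict.counter (pvKeys answers 0) := by
  rw [pvFreq, pvKeys, ← PySem.Dict.foldl_insert_getD_add_one_eq_counter, List.foldl_map]
  simp only [Nat.cast_zero]

lemma foldl_if_add (P : Int × Int → Bool) (c : Int × Int → Int) (u : List (Int × Int)) (acc : Int) :
    u.foldl (fun s k => if P k then s + c k else s) acc
      = acc + ((u.filter P).map c).sum := by
  induction u generalizing acc with
  | nil => simp
  | cons k rest ih =>
      by_cases h : P k = true <;> simp [List.foldl_cons, ih, h] <;> ring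

lemma countP_hit_eq_pvCnt (p : List Int) (hp : p ≠ []) (hdvd : p.length ∣ 40)
    (l : List Int) (i : Nat) :
    ((pvKeys l i).countP (pvHit p) : Int) = pvCnt p l i := by
  induction l generalizing i with
  | nil => simp [pvKeys, PySem.List.enumerate_nil, pvCnt]
  | cons x rest ih =>
      have hlen : 0 < p.length := List.length_pos_iff.mpr hp
      have h40 : PySem.Int.mod (i : Int) 40 = ((i % 40 : Nat) : Int) := by
        exact_mod_cast PySem.Int.mod_natCast i 40
      have hmod : PySem.Int.mod ((i % 40 : Nat) : Int) (p.length : Int)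
          = ((i % p.length : Nat) : Int) := by
        rw [PySem.Int.mod_natCast]
        rw [Nat.mod_mod_of_dvd i hdvd]
      have hcast : ((i : Int) + 1) = ((i + 1 : Nat) : Int) := by push_cast; ring
      rw [pvKeys, PySem.List.enumerate_cons, List.map_cons, List.countP_cons]
      rw [hcast]
      have ih' := ih (i + 1)
      rw [pvKeys] at ih'
      simp only [pvHit, h40, hmod, PySem.List.pyGetD_natCast]
      rw [pvCnt]
      push_cast [← ih']
      by_cases h : p.getD (i % p.length) 0 = x <;> simp [pvHit, h40, hmod,
        PySem.List.pyGetD_natCast, h] <;> ring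

-- the same count under the Prod BEq instance and the DecidableEq-derived one
lemma count_inst_eq (k : Int × Int) (l : List (Int × Int)) :
    @List.count (Int × Int) instBEqProd k l
      = @List.count (Int × Int) instBEqOfDecidableEq k l := by
  induction l with
  | nil => rfl
  | cons a t ih =>
      rw [@List.count_cons _ instBEqProd, @List.count_cons _ instBEqOfDecidableEq, ih]
      simp

lemma pvScoreOf_eq (p : List Int) (hp : p ≠ []) (hdvd : p.length ∣ 40) (answers : List Int) :
    pvScoreOf (pvFreq answers) p = pvCnt p answers 0 := by
  rw [pvFreq_eq_counter, pvScoreOf, PySem.Dict.items_counter, List.foldl_map]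
  have hfold := foldl_if_add (pvHit p)
      (fun k => ((pvKeys answers 0).count k : Int)) (PySem.Set.ofList (pvKeys answers 0)) 0
  simp only [pvHit, decide_eq_true_eq] at hfold
  rw [hfold, zero_add]
  -- sum over the distinct keys = sum over Mathlib's dedup (a permutation)
  have hperm : (PySem.Set.ofList (pvKeys answers 0) : List (Int × Int)).Perm
      (pvKeys answers 0).dedup := by
    rw [List.perm_ext_iff_of_nodup (PySem.Set.nodup_ofList _) (List.nodup_dedup _)]
    intro a
    rw [PySem.Set.mem_ofList, List.mem_dedup]
  have hsum := ((hperm.filter (pvHit p)).map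
      (fun k => ((pvKeys answers 0).count k : Int))).sum_eq
  rw [hsum]
  have hcast : ((((pvKeys answers 0).dedup.filter (pvHit p)).map
        (fun k => ((pvKeys answers 0).count k : Int))).sum)
      = ((((pvKeys answers 0).dedup.filter (pvHit p)).map
        (fun k => (pvKeys answers 0).count k)).sum : Int) := by
    rw [Nat.cast_list_sum, List.map_map]
    rfl
  rw [hcast, ← countP_hit_eq_pvCnt p hp hdvd answers 0, Nat.cast_inj]
  rw [show (fun k => List.count k (pvKeys answers 0))
      = (fun k => @List.count _ instBEqOfDecidableEq k (pvKeys answers 0))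
    from funext (fun k => count_inst_eq k _)]
  exact List.sum_map_count_dedup_filter_eq_countP (pvHit p) (pvKeys answers 0)

-- ===== VERDICT (by name: the statement is the Claim_ definition above) =====
theorem solution_spec : Claim_equal_solution := by
  intro answers _
  show solution answers = solution_alt answers
  simp only [solution, solution_alt, pvPatterns, List.map,
    solutionLoop_eq answers 0 0 0 0,
    pvScoreOf_eq [1, 2, 3, 4, 5] (by decide) (by decide) answers,
    pvScoreOf_eq [2, 1, 2, 3, 2, 4, 2, 5] (by decide) (by decide) answers,
    pvScoreOf_eq [3, 3, 1, 1, 2, 2, 4, 4, 5, 5] (by decide) (by decide) answers,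
    pvPatA, pvPatB, pvPatC, zero_add]
  simp only [PySem.List.enumerate_cons, PySem.List.enumerate_nil,
    List.foldl_cons, List.foldl_nil, List.filterMap_cons, List.filterMap_nil]
  split_ifs <;> simp
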